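-- pv_equiv track=rewrite | github.com/lisj1211/NLP | ERNIE_to_Pytorch/convert.py | build_params_map
-- ===== SOURCE A (Python) =====
-- from collections import OrderedDict
--
-- def build_params_map(attention_num):
--     """
--     build params map from paddle-paddle's ERNIE to transformer's BERT
--     :param attention_num: attention block nums
--     :return:
--     """
--     # embeddings block map
--     weight_map = OrderedDict({
--         'ernie.embeddings.word_embeddings.weight': "bert.embeddings.word_embeddings.weight",
--         'ernie.embeddings.position_embeddings.weight': "bert.embeddings.position_embeddings.weight",
--         'ernie.embeddings.token_type_embeddings.weight': "bert.embeddings.token_type_embeddings.weight",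
--         'ernie.embeddings.task_type_embeddings.weight': "bert.embeddings.task_type_embeddings.weight",
--         'ernie.embeddings.layer_norm.weight': 'bert.embeddings.LayerNorm.gamma',
--         'ernie.embeddings.layer_norm.bias': 'bert.embeddings.LayerNorm.beta',
--     })
--     # attention block map
--     for i in range(attention_num):
--         weight_map[f'ernie.encoder.layers.{i}.self_attn.q_proj.weight'] = f'bert.encoder.layer.{i}.attention.self.query.weight'
--         weight_map[f'ernie.encoder.layers.{i}.self_attn.q_proj.bias'] = f'bert.encoder.layer.{i}.attention.self.query.bias'
--         weight_map[f'ernie.encoder.layers.{i}.self_attn.k_proj.weight'] = f'bert.encoder.layer.{i}.attention.self.key.weight'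
--         weight_map[f'ernie.encoder.layers.{i}.self_attn.k_proj.bias'] = f'bert.encoder.layer.{i}.attention.self.key.bias'
--         weight_map[f'ernie.encoder.layers.{i}.self_attn.v_proj.weight'] = f'bert.encoder.layer.{i}.attention.self.value.weight'
--         weight_map[f'ernie.encoder.layers.{i}.self_attn.v_proj.bias'] = f'bert.encoder.layer.{i}.attention.self.value.bias'
--         weight_map[f'ernie.encoder.layers.{i}.self_attn.out_proj.weight'] = f'bert.encoder.layer.{i}.attention.output.dense.weight'
--         weight_map[f'ernie.encoder.layers.{i}.self_attn.out_proj.bias'] = f'bert.encoder.layer.{i}.attention.output.dense.bias'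
--         weight_map[f'ernie.encoder.layers.{i}.norm1.weight'] = f'bert.encoder.layer.{i}.attention.output.LayerNorm.gamma'
--         weight_map[f'ernie.encoder.layers.{i}.norm1.bias'] = f'bert.encoder.layer.{i}.attention.output.LayerNorm.beta'
--         weight_map[f'ernie.encoder.layers.{i}.linear1.weight'] = f'bert.encoder.layer.{i}.intermediate.dense.weight'
--         weight_map[f'ernie.encoder.layers.{i}.linear1.bias'] = f'bert.encoder.layer.{i}.intermediate.dense.bias'
--         weight_map[f'ernie.encoder.layers.{i}.linear2.weight'] = f'bert.encoder.layer.{i}.output.dense.weight'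
--         weight_map[f'ernie.encoder.layers.{i}.linear2.bias'] = f'bert.encoder.layer.{i}.output.dense.bias'
--         weight_map[f'ernie.encoder.layers.{i}.norm2.weight'] = f'bert.encoder.layer.{i}.output.LayerNorm.gamma'
--         weight_map[f'ernie.encoder.layers.{i}.norm2.bias'] = f'bert.encoder.layer.{i}.output.LayerNorm.beta'
--
--     return weight_map
-- ===== SOURCE B (Python) =====
-- from collections import OrderedDict
--
-- # Single-sided data: only the ERNIE parameter names are listed; the BERT name of
-- # each parameter is DERIVED from its ERNIE name by an ordered string-rewrite pass.
-- _RULES = [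
--     ('ernie.', 'bert.'),
--     ('layer_norm.weight', 'LayerNorm.gamma'),
--     ('layer_norm.bias', 'LayerNorm.beta'),
--     ('self_attn.q_proj', 'attention.self.query'),
--     ('self_attn.k_proj', 'attention.self.key'),
--     ('self_attn.v_proj', 'attention.self.value'),
--     ('self_attn.out_proj', 'attention.output.dense'),
--     ('norm1.weight', 'attention.output.LayerNorm.gamma'),
--     ('norm1.bias', 'attention.output.LayerNorm.beta'),
--     ('linear1', 'intermediate.dense'),
--     ('linear2', 'output.dense'),
--     ('norm2.weight', 'output.LayerNorm.gamma'),
--     ('norm2.bias', 'output.LayerNorm.beta'),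
-- ]
--
-- _EMB_KEYS = [
--     'ernie.embeddings.word_embeddings.weight',
--     'ernie.embeddings.position_embeddings.weight',
--     'ernie.embeddings.token_type_embeddings.weight',
--     'ernie.embeddings.task_type_embeddings.weight',
--     'ernie.embeddings.layer_norm.weight',
--     'ernie.embeddings.layer_norm.bias',
-- ]
--
-- _LAYER_KEYS = [
--     'self_attn.q_proj.weight', 'self_attn.q_proj.bias',
--     'self_attn.k_proj.weight', 'self_attn.k_proj.bias',
--     'self_attn.v_proj.weight', 'self_attn.v_proj.bias',
--     'self_attn.out_proj.weight', 'self_attn.out_proj.bias',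
--     'norm1.weight', 'norm1.bias',
--     'linear1.weight', 'linear1.bias',
--     'linear2.weight', 'linear2.bias',
--     'norm2.weight', 'norm2.bias',
-- ]
--
-- def _rename(name):
--     for old, new in _RULES:
--         name = name.replace(old, new)
--     return name
--
-- def build_params_map(attention_num):
--     wm = OrderedDict((k, _rename(k)) for k in _EMB_KEYS)
--     for i in range(attention_num):
--         for s in _LAYER_KEYS:
--             wm[f'ernie.encoder.layers.{i}.{s}'] = f'bert.encoder.layer.{i}.{_rename(s)}'
--     return wm
-- ===== Notes on version B (the rewrite author's own statement) =====
-- stated objective: alternative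
-- what changed: A stores both sides of the mapping as paired literals and mutates the dict with a block of inline assignments; B stores only the ERNIE parameter names and DERIVES each BERT name from its ERNIE name by an ordered string-rewrite (replace-rule) pass, so the BERT side exists only as rewrite rules, not as a second name table.
import Mathlib
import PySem

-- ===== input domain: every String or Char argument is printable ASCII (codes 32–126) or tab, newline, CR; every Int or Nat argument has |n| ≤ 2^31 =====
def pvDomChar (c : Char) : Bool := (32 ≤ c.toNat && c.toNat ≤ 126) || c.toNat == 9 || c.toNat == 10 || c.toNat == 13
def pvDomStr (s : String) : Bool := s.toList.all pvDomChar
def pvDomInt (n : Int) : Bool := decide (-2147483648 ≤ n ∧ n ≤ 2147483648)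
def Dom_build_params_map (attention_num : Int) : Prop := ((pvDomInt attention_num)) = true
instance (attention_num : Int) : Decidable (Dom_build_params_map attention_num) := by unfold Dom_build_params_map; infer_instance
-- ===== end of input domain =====

-- B keeps only the ERNIE names and derives each BERT name by an ordered string-rewrite
-- pass instead of A's paired-literal assignments (objective: alternative).

-- ===== PORT A =====
def build_params_map (attention_num : Int) : List (String × String) :=
  -- weight_map = OrderedDict({... six embedding entries ...})
  let weight_map : PySem.Dict String String := PySem.Dict.ofList
    [("ernie.embeddings.word_embeddings.weight", "bert.embeddings.word_embeddings.weight"),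
     ("ernie.embeddings.position_embeddings.weight", "bert.embeddings.position_embeddings.weight"),
     ("ernie.embeddings.token_type_embeddings.weight", "bert.embeddings.token_type_embeddings.weight"),
     ("ernie.embeddings.task_type_embeddings.weight", "bert.embeddings.task_type_embeddings.weight"),
     ("ernie.embeddings.layer_norm.weight", "bert.embeddings.LayerNorm.gamma"),
     ("ernie.embeddings.layer_norm.bias", "bert.embeddings.LayerNorm.beta")]
  -- for i in range(attention_num): 16 assignments
  let weight_map := (PySem.List.pyRange 0 attention_num 1).foldl (fun d i =>
    let t := PySem.Int.toStr i
    let d := d.insert ("ernie.encoder.layers." ++ t ++ ".self_attn.q_proj.weight") ("bert.encoder.layer." ++ t ++ ".attention.self.query.weight")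
    let d := d.insert ("ernie.encoder.layers." ++ t ++ ".self_attn.q_proj.bias") ("bert.encoder.layer." ++ t ++ ".attention.self.query.bias")
    let d := d.insert ("ernie.encoder.layers." ++ t ++ ".self_attn.k_proj.weight") ("bert.encoder.layer." ++ t ++ ".attention.self.key.weight")
    let d := d.insert ("ernie.encoder.layers." ++ t ++ ".self_attn.k_proj.bias") ("bert.encoder.layer." ++ t ++ ".attention.self.key.bias")
    let d := d.insert ("ernie.encoder.layers." ++ t ++ ".self_attn.v_proj.weight") ("bert.encoder.layer." ++ t ++ ".attention.self.value.weight")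
    let d := d.insert ("ernie.encoder.layers." ++ t ++ ".self_attn.v_proj.bias") ("bert.encoder.layer." ++ t ++ ".attention.self.value.bias")
    let d := d.insert ("ernie.encoder.layers." ++ t ++ ".self_attn.out_proj.weight") ("bert.encoder.layer." ++ t ++ ".attention.output.dense.weight")
    let d := d.insert ("ernie.encoder.layers." ++ t ++ ".self_attn.out_proj.bias") ("bert.encoder.layer." ++ t ++ ".attention.output.dense.bias")
    let d := d.insert ("ernie.encoder.layers." ++ t ++ ".norm1.weight") ("bert.encoder.layer." ++ t ++ ".attention.output.LayerNorm.gamma")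
    let d := d.insert ("ernie.encoder.layers." ++ t ++ ".norm1.bias") ("bert.encoder.layer." ++ t ++ ".attention.output.LayerNorm.beta")
    let d := d.insert ("ernie.encoder.layers." ++ t ++ ".linear1.weight") ("bert.encoder.layer." ++ t ++ ".intermediate.dense.weight")
    let d := d.insert ("ernie.encoder.layers." ++ t ++ ".linear1.bias") ("bert.encoder.layer." ++ t ++ ".intermediate.dense.bias")
    let d := d.insert ("ernie.encoder.layers." ++ t ++ ".linear2.weight") ("bert.encoder.layer." ++ t ++ ".output.dense.weight")
    let d := d.insert ("ernie.encoder.layers." ++ t ++ ".linear2.bias") ("bert.encoder.layer." ++ t ++ ".output.dense.bias")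
    let d := d.insert ("ernie.encoder.layers." ++ t ++ ".norm2.weight") ("bert.encoder.layer." ++ t ++ ".output.LayerNorm.gamma")
    let d := d.insert ("ernie.encoder.layers." ++ t ++ ".norm2.bias") ("bert.encoder.layer." ++ t ++ ".output.LayerNorm.beta")
    d) weight_map
  weight_map.items

-- ===== PORT B =====
-- _RULES of Source B (ordered rewrite rules)
def pvRules : List (String × String) :=
  [("ernie.", "bert."),
   ("layer_norm.weight", "LayerNorm.gamma"),
   ("layer_norm.bias", "LayerNorm.beta"),
   ("self_attn.q_proj", "attention.self.query"),
   ("self_attn.k_proj", "attention.self.key"),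
   ("self_attn.v_proj", "attention.self.value"),
   ("self_attn.out_proj", "attention.output.dense"),
   ("norm1.weight", "attention.output.LayerNorm.gamma"),
   ("norm1.bias", "attention.output.LayerNorm.beta"),
   ("linear1", "intermediate.dense"),
   ("linear2", "output.dense"),
   ("norm2.weight", "output.LayerNorm.gamma"),
   ("norm2.bias", "output.LayerNorm.beta")]

-- _EMB_KEYS of Source B
def pvEmbKeys : List String :=
  ["ernie.embeddings.word_embeddings.weight",
   "ernie.embeddings.position_embeddings.weight",
   "ernie.embeddings.token_type_embeddings.weight",
   "ernie.embeddings.task_type_embeddings.weight",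
   "ernie.embeddings.layer_norm.weight",
   "ernie.embeddings.layer_norm.bias"]

-- _LAYER_KEYS of Source B
def pvLayerKeys : List String :=
  ["self_attn.q_proj.weight", "self_attn.q_proj.bias",
   "self_attn.k_proj.weight", "self_attn.k_proj.bias",
   "self_attn.v_proj.weight", "self_attn.v_proj.bias",
   "self_attn.out_proj.weight", "self_attn.out_proj.bias",
   "norm1.weight", "norm1.bias",
   "linear1.weight", "linear1.bias",
   "linear2.weight", "linear2.bias",
   "norm2.weight", "norm2.bias"]

-- _rename of Source B: apply each replace rule in order
def pvRename (name : String) : String :=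
  pvRules.foldl (fun n p => PySem.Str.replace n p.1 p.2) name

def build_params_map_alt (attention_num : Int) : List (String × String) :=
  -- wm = OrderedDict((k, _rename(k)) for k in _EMB_KEYS)
  let wm : PySem.Dict String String :=
    PySem.Dict.ofList (pvEmbKeys.map (fun k => (k, pvRename k)))
  -- for i in range(attention_num): for s in _LAYER_KEYS: wm[...] = ...
  let wm := (PySem.List.pyRange 0 attention_num 1).foldl (fun d i =>
    pvLayerKeys.foldl (fun d s =>
      d.insert ("ernie.encoder.layers." ++ PySem.Int.toStr i ++ "." ++ s)
               ("bert.encoder.layer." ++ PySem.Int.toStr i ++ "." ++ pvRename s)) d) wm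
  wm.items

-- ===== PRECONDITION & SPEC =====
def Spec_build_params_map (attention_num : Int) (out : List (String × String)) : Prop := out = build_params_map_alt attention_num
instance (attention_num : Int) (out : List (String × String)) : Decidable (Spec_build_params_map attention_num out) := by unfold Spec_build_params_map; infer_instance

-- ===== CLAIM (what is proved, stated in full; the proofs are below) =====
def Claim_equal_build_params_map : Prop := ∀ (attention_num : Int), Dom_build_params_map attention_num → Spec_build_params_map attention_num (build_params_map attention_num)

-- ===== LEMMAS AND PROOFS =====

set_option maxRecDepth 100000 in
-- the two seed dicts coincide: renaming the six embedding names yields A's literal pairs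
theorem pv_seed_eq :
    pvEmbKeys.map (fun k => (k, pvRename k))
      = [("ernie.embeddings.word_embeddings.weight", "bert.embeddings.word_embeddings.weight"),
         ("ernie.embeddings.position_embeddings.weight", "bert.embeddings.position_embeddings.weight"),
         ("ernie.embeddings.token_type_embeddings.weight", "bert.embeddings.token_type_embeddings.weight"),
         ("ernie.embeddings.task_type_embeddings.weight", "bert.embeddings.task_type_embeddings.weight"),
         ("ernie.embeddings.layer_norm.weight", "bert.embeddings.LayerNorm.gamma"),
         ("ernie.embeddings.layer_norm.bias", "bert.embeddings.LayerNorm.beta")] := by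
  decide

set_option maxRecDepth 100000 in
-- renaming the sixteen layer suffixes yields A's literal BERT suffixes
theorem pv_suffix_eq :
    pvLayerKeys.map pvRename
      = ["attention.self.query.weight", "attention.self.query.bias",
         "attention.self.key.weight", "attention.self.key.bias",
         "attention.self.value.weight", "attention.self.value.bias",
         "attention.output.dense.weight", "attention.output.dense.bias",
         "attention.output.LayerNorm.gamma", "attention.output.LayerNorm.beta",
         "intermediate.dense.weight", "intermediate.dense.bias",
         "output.dense.weight", "output.dense.bias",
         "output.LayerNorm.gamma", "output.LayerNorm.beta"] := by
  decide

-- the two per-layer step functions agree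
theorem pv_step_eq (d : PySem.Dict String String) (i : Int) :
    pvLayerKeys.foldl (fun d s =>
      d.insert ("ernie.encoder.layers." ++ PySem.Int.toStr i ++ "." ++ s)
               ("bert.encoder.layer." ++ PySem.Int.toStr i ++ "." ++ pvRename s)) d
    = (let t := PySem.Int.toStr i
       let d := d.insert ("ernie.encoder.layers." ++ t ++ ".self_attn.q_proj.weight") ("bert.encoder.layer." ++ t ++ ".attention.self.query.weight")
       let d := d.insert ("ernie.encoder.layers." ++ t ++ ".self_attn.q_proj.bias") ("bert.encoder.layer." ++ t ++ ".attention.self.query.bias")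
       let d := d.insert ("ernie.encoder.layers." ++ t ++ ".self_attn.k_proj.weight") ("bert.encoder.layer." ++ t ++ ".attention.self.key.weight")
       let d := d.insert ("ernie.encoder.layers." ++ t ++ ".self_attn.k_proj.bias") ("bert.encoder.layer." ++ t ++ ".attention.self.key.bias")
       let d := d.insert ("ernie.encoder.layers." ++ t ++ ".self_attn.v_proj.weight") ("bert.encoder.layer." ++ t ++ ".attention.self.value.weight")
       let d := d.insert ("ernie.encoder.layers." ++ t ++ ".self_attn.v_proj.bias") ("bert.encoder.layer." ++ t ++ ".attention.self.value.bias")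
       let d := d.insert ("ernie.encoder.layers." ++ t ++ ".self_attn.out_proj.weight") ("bert.encoder.layer." ++ t ++ ".attention.output.dense.weight")
       let d := d.insert ("ernie.encoder.layers." ++ t ++ ".self_attn.out_proj.bias") ("bert.encoder.layer." ++ t ++ ".attention.output.dense.bias")
       let d := d.insert ("ernie.encoder.layers." ++ t ++ ".norm1.weight") ("bert.encoder.layer." ++ t ++ ".attention.output.LayerNorm.gamma")
       let d := d.insert ("ernie.encoder.layers." ++ t ++ ".norm1.bias") ("bert.encoder.layer." ++ t ++ ".attention.output.LayerNorm.beta")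
       let d := d.insert ("ernie.encoder.layers." ++ t ++ ".linear1.weight") ("bert.encoder.layer." ++ t ++ ".intermediate.dense.weight")
       let d := d.insert ("ernie.encoder.layers." ++ t ++ ".linear1.bias") ("bert.encoder.layer." ++ t ++ ".intermediate.dense.bias")
       let d := d.insert ("ernie.encoder.layers." ++ t ++ ".linear2.weight") ("bert.encoder.layer." ++ t ++ ".output.dense.weight")
       let d := d.insert ("ernie.encoder.layers." ++ t ++ ".linear2.bias") ("bert.encoder.layer." ++ t ++ ".output.dense.bias")
       let d := d.insert ("ernie.encoder.layers." ++ t ++ ".norm2.weight") ("bert.encoder.layer." ++ t ++ ".output.LayerNorm.gamma")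
       let d := d.insert ("ernie.encoder.layers." ++ t ++ ".norm2.bias") ("bert.encoder.layer." ++ t ++ ".output.LayerNorm.beta")
       d) := by
  have h := pv_suffix_eq
  simp only [pvLayerKeys, List.map_cons, List.map_nil, List.cons.injEq, and_true] at h
  obtain ⟨h1, h2, h3, h4, h5, h6, h7, h8, h9, h10, h11, h12, h13, h14, h15, h16⟩ := h
  simp only [pvLayerKeys, List.foldl_cons, List.foldl_nil,
    h1, h2, h3, h4, h5, h6, h7, h8, h9, h10, h11, h12, h13, h14, h15, h16,
    String.append_assoc, String.reduceAppend]

-- ===== VERDICT (by name: the statement is the Claim_ definition above) =====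
theorem build_params_map_spec : Claim_equal_build_params_map := by
  intro n _
  unfold Spec_build_params_map build_params_map build_params_map_alt
  rw [pv_seed_eq]
  exact congrArg PySem.Dict.items
    (PySem.List.foldl_congr_mem _ _ _ _ (fun d i _ => (pv_step_eq d i).symm))
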